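-- pv_equiv track=rewrite | github.com/jaehyeonkim2358/W02_teamB7 | 2805/2805_kjh.py | solution
-- ===== SOURCE A (Python) =====
-- def solution(target, key):
--     s = 0
--     e = max(target)
--     while s < e:
--         m = (s + e) // 2 + 1
--         if get_height(target, m) < key:
--             e = m - 1
--         else:
--             s = m
--     return s
--
-- def get_height(target, h):
--     sum = 0
--     for t in target:
--         sum += (t-h if t>h else 0)
--     return sum
-- ===== SOURCE B (Python) =====
-- def solution(target, key):
--     d = sorted(target, reverse=True)
--     best = None
--     p = 0
--     for i, t in enumerate(d, 1):
--         p += t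
--         c = (p - key) // i
--         if best is None or c > best:
--             best = c
--     return max(0, min(d[0], best))
-- ===== Notes on version B (the rewrite author's own statement) =====
-- stated objective: alternative
-- what changed: Replaces the binary search over cut heights (re-summing the harvest at every probe) by a sort-descending + prefix-sum scan that computes the optimal cut height for each possible count of trees above the cut in closed form ((prefix_i - key)//i), taking the maximum clamped to [0, max(target)].
import Mathlib
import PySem

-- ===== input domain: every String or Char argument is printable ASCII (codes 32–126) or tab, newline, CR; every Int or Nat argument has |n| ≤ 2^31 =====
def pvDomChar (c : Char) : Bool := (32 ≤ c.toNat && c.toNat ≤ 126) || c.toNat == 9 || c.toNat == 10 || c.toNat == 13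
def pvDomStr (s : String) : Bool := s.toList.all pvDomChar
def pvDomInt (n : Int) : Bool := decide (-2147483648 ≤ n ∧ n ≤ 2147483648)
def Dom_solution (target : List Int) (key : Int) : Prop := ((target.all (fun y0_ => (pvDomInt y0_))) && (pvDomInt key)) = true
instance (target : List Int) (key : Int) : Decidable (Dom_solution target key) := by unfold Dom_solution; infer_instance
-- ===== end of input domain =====

-- B replaces A's binary search over cut heights by a sort-descending + prefix-sum closed-form scan
-- (same return value; A and B both raise on an empty list, which Pre_ excludes).

-- ===== PORT A =====
-- port of get_height
def getHeight (target : List Int) (h : Int) : Int :=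
  target.foldl (fun s t => s + (if t > h then t - h else 0)) 0

-- port of A's while loop (state s, e); terminates because e - s shrinks
def solLoop (target : List Int) (key : Int) (s e : Int) : Int :=
  if hlt : s < e then
    let m := PySem.Int.floordiv (s + e) 2 + 1
    if getHeight target m < key then solLoop target key s (m - 1)
    else solLoop target key m e
  else s
termination_by (e - s).toNat
decreasing_by
  · have h1 : PySem.Int.floordiv (s + e) 2 < e :=
      (PySem.Int.floordiv_lt_iff_lt_mul (by omega)).mpr (by omega)
    omega
  · have h2 : s ≤ PySem.Int.floordiv (s + e) 2 :=
      (PySem.Int.le_floordiv_iff_mul_le (by omega)).mpr (by omega)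
    omega

def solution (target : List Int) (key : Int) : Int :=
  match PySem.List.max? target (fun x => x) with
  | none => 0            -- unreachable under Pre_: Python raises ValueError on max([])
  | some e0 => solLoop target key 0 e0

-- ===== PORT B =====
-- one step of Source B's loop over enumerate(d, 1); state = (i, p, best)
def altStep (key : Int) (st : Int × Int × Option Int) (t : Int) : Int × Int × Option Int :=
  let i := st.1 + 1
  let p := st.2.1 + t
  let c := PySem.Int.floordiv (p - key) i
  let best : Option Int :=
    match st.2.2 with
    | none => some c
    | some b => if c > b then some c else some b
  (i, p, best)

def solution_alt (target : List Int) (key : Int) : Int :=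
  let d := PySem.List.sorted target (fun x => x) true
  let st := d.foldl (altStep key) (0, 0, none)
  match PySem.List.pyGet? d 0, st.2.2 with
  | some t0, some b => max 0 (min t0 b)
  | _, _ => 0           -- unreachable under Pre_: Python raises IndexError on d[0]

-- ===== PRECONDITION & SPEC =====
-- Pre_ excludes only the empty list, on which A raises ValueError (max([])) and B raises IndexError.
def Pre_solution (target : List Int) (key : Int) : Prop := target ≠ []
instance (target : List Int) (key : Int) : Decidable (Pre_solution target key) := by
  unfold Pre_solution; infer_instance

def pvWitness_solution : List Int × Int := ([3, 1], 2)

def Spec_solution (target : List Int) (key : Int) (out : Int) : Prop := out = solution_alt target key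
instance (target : List Int) (key : Int) (out : Int) : Decidable (Spec_solution target key out) := by
  unfold Spec_solution; infer_instance

-- ===== CLAIM (what is proved, stated in full; the proofs are below) =====
def Claim_equal_solution : Prop := ∀ (target : List Int) (key : Int), Dom_solution target key → Pre_solution target key → Spec_solution target key (solution target key)

-- ===== LEMMAS AND PROOFS =====

theorem getHeight_eq_sum (l : List Int) (h : Int) :
    getHeight l h = (l.map (fun t => max (t - h) 0)).sum := by
  suffices H : ∀ a : Int, l.foldl (fun s t => s + (if t > h then t - h else 0)) a
      = a + (l.map (fun t => max (t - h) 0)).sum by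
    simpa [getHeight] using H 0
  induction l with
  | nil => intro a; simp
  | cons t r ih =>
    intro a
    simp only [List.foldl_cons, List.map_cons, List.sum_cons, ih]
    have : (if t > h then t - h else 0) = max (t - h) 0 := by split_ifs <;> omega
    rw [this]; ring

theorem getHeight_perm {l l' : List Int} (hp : l.Perm l') (h : Int) :
    getHeight l h = getHeight l' h := by
  rw [getHeight_eq_sum, getHeight_eq_sum]
  exact (hp.map _).sum_eq

theorem getHeight_nonneg (l : List Int) (h : Int) : 0 ≤ getHeight l h := by
  rw [getHeight_eq_sum]
  apply List.sum_nonneg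
  intro x hx
  obtain ⟨t, -, rfl⟩ := List.mem_map.mp hx
  exact le_max_right _ _

theorem getHeight_mono (l : List Int) {h h' : Int} (hh : h ≤ h') :
    getHeight l h' ≤ getHeight l h := by
  rw [getHeight_eq_sum, getHeight_eq_sum]
  apply List.sum_le_sum
  intro t _
  have : t - h' ≤ t - h := by omega
  omega

theorem getHeight_append (l1 l2 : List Int) (h : Int) :
    getHeight (l1 ++ l2) h = getHeight l1 h + getHeight l2 h := by
  simp [getHeight_eq_sum]

theorem sub_le_getHeight (l : List Int) (h : Int) :
    l.sum - l.length * h ≤ getHeight l h := by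
  induction l with
  | nil => simp [getHeight]
  | cons t r ih =>
    rw [getHeight_eq_sum] at ih ⊢
    simp only [List.map_cons, List.sum_cons, List.length_cons]
    have hm : t - h ≤ max (t - h) 0 := le_max_left _ _
    push_cast
    nlinarith [hm, ih]

-- the harvest is at least (sum of any i-prefix) - i*h
theorem take_sub_le_getHeight (l : List Int) (i : Nat) (hi : i ≤ l.length) (h : Int) :
    (l.take i).sum - i * h ≤ getHeight l h := by
  have hsplit : getHeight l h = getHeight (l.take i) h + getHeight (l.drop i) h := by
    rw [← getHeight_append, List.take_append_drop]
  have hlen : (l.take i).length = i := by simp [List.length_take, hi]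
  have h1 := sub_le_getHeight (l.take i) h
  have h2 := getHeight_nonneg (l.drop i) h
  rw [hlen] at h1
  omega

theorem getHeight_all_gt (l : List Int) (h : Int) (hall : ∀ t ∈ l, h < t) :
    getHeight l h = l.sum - l.length * h := by
  induction l with
  | nil => simp [getHeight]
  | cons t r ih =>
    rw [getHeight_eq_sum] at ih ⊢
    simp only [List.map_cons, List.sum_cons, List.length_cons]
    have ht : h < t := hall t (by simp)
    have hr := ih (fun x hx => hall x (by simp [hx]))
    have : max (t - h) 0 = t - h := by omega
    rw [this, hr]
    push_cast
    ring

theorem getHeight_all_le (l : List Int) (h : Int) (hall : ∀ t ∈ l, t ≤ h) :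
    getHeight l h = 0 := by
  induction l with
  | nil => simp [getHeight]
  | cons t r ih =>
    rw [getHeight_eq_sum] at ih ⊢
    simp only [List.map_cons, List.sum_cons]
    have ht : t ≤ h := hall t (by simp)
    have hr := ih (fun x hx => hall x (by simp [hx]))
    have : max (t - h) 0 = 0 := by omega
    rw [this, hr]
    ring

theorem dropWhile_le_of_pairwise (d : List Int) (h : Int)
    (hpw : d.Pairwise (fun a b => b ≤ a)) :
    ∀ t ∈ d.dropWhile (fun t => decide (h < t)), t ≤ h := by
  induction d with
  | nil => simp
  | cons a r ih =>
    rw [List.pairwise_cons] at hpw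
    intro t ht
    rw [List.dropWhile_cons] at ht
    by_cases ha : h < a
    · simp only [ha, decide_true] at ht
      exact ih hpw.2 t ht
    · simp only [ha, decide_false] at ht
      rcases List.mem_cons.mp ht with rfl | hmem
      · omega
      · have := hpw.1 t hmem
        omega

-- on a descending list the harvest at h equals (prefix sum of trees above h) - count*h
theorem getHeight_sorted_eq (d : List Int) (h : Int)
    (hpw : d.Pairwise (fun a b => b ≤ a)) :
    getHeight d h = (d.takeWhile (fun t => decide (h < t))).sum
      - (d.takeWhile (fun t => decide (h < t))).length * h := by
  have hsplit : d = d.takeWhile (fun t => decide (h < t)) ++ d.dropWhile (fun t => decide (h < t)) :=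
    (List.takeWhile_append_dropWhile).symm
  have h1 : getHeight (d.takeWhile (fun t => decide (h < t))) h
      = (d.takeWhile (fun t => decide (h < t))).sum
        - (d.takeWhile (fun t => decide (h < t))).length * h := by
    apply getHeight_all_gt
    intro t ht
    have := List.mem_takeWhile_imp ht
    simpa using this
  have h2 : getHeight (d.dropWhile (fun t => decide (h < t))) h = 0 :=
    getHeight_all_le _ _ (dropWhile_le_of_pairwise d h hpw)
  calc getHeight d h = getHeight (d.takeWhile (fun t => decide (h < t)) ++ d.dropWhile (fun t => decide (h < t))) h := by rw [← hsplit]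
    _ = _ := by rw [getHeight_append, h1, h2]; ring

-- ---- characterisation of B's fold ----

def bestNum (key : Int) : List Int → Int → Int → Int → Int
  | [], _, _, b => b
  | t :: r, i, p, b =>
      bestNum key r (i + 1) (p + t) (max b (PySem.Int.floordiv (p + t - key) (i + 1)))

theorem foldl_altStep_best (key : Int) (l : List Int) :
    ∀ (i p b : Int), (l.foldl (altStep key) (i, p, some b)).2.2 = some (bestNum key l i p b) := by
  induction l with
  | nil => intro i p b; simp [bestNum]
  | cons t r ih =>
    intro i p b
    have hstep : altStep key (i, p, some b) t
        = (i + 1, p + t, some (max b (PySem.Int.floordiv (p + t - key) (i + 1)))) := by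
      have hmax : (if PySem.Int.floordiv (p + t - key) (i + 1) > b
            then some (PySem.Int.floordiv (p + t - key) (i + 1)) else some b)
          = some (max b (PySem.Int.floordiv (p + t - key) (i + 1))) := by
        split_ifs with hc
        · rw [max_eq_right (le_of_lt hc)]
        · rw [max_eq_left (not_lt.mp hc)]
      simp only [altStep]
      rw [hmax]
    rw [List.foldl_cons, hstep, ih, bestNum]

theorem le_bestNum (key : Int) (l : List Int) :
    ∀ (i p b : Int), b ≤ bestNum key l i p b := by
  induction l with
  | nil => intro i p b; simp [bestNum]
  | cons t r ih =>
    intro i p b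
    exact le_trans (le_max_left _ _) (ih _ _ _)

theorem cand_le_bestNum (key : Int) (l : List Int) :
    ∀ (i p b : Int) (j : Nat), j < l.length →
      PySem.Int.floordiv (p + (l.take (j + 1)).sum - key) (i + (j + 1 : Nat)) ≤ bestNum key l i p b := by
  induction l with
  | nil => intro i p b j hj; simp at hj
  | cons t r ih =>
    intro i p b j hj
    cases j with
    | zero =>
      have h0 : PySem.Int.floordiv (p + t - key) (i + 1) ≤ bestNum key (t :: r) i p b :=
        le_trans (le_max_right b _) (le_bestNum key r _ _ _)
      simpa using h0
    | succ j' =>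
      have := ih (i + 1) (p + t) (max b (PySem.Int.floordiv (p + t - key) (i + 1))) j'
        (by simpa using Nat.lt_of_succ_lt_succ hj)
      rw [bestNum]
      convert this using 2
      · simp [List.take_succ_cons]; ring
      · push_cast; ring

theorem bestNum_attained (key : Int) (l : List Int) :
    ∀ (i p b : Int), bestNum key l i p b = b ∨
      ∃ j : Nat, j < l.length ∧
        bestNum key l i p b = PySem.Int.floordiv (p + (l.take (j + 1)).sum - key) (i + (j + 1 : Nat)) := by
  induction l with
  | nil => intro i p b; left; simp [bestNum]
  | cons t r ih =>
    intro i p b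
    rw [bestNum]
    rcases ih (i + 1) (p + t) (max b (PySem.Int.floordiv (p + t - key) (i + 1))) with heq | ⟨j, hj, heq⟩
    · rw [heq]
      rcases max_choice b (PySem.Int.floordiv (p + t - key) (i + 1)) with hm | hm
      · left; exact hm
      · right; exact ⟨0, by simp, by rw [hm]; simp⟩
    · right
      refine ⟨j + 1, by simpa using Nat.succ_lt_succ hj, ?_⟩
      rw [heq]
      congr 1
      · simp [List.take_succ_cons]; ring
      · push_cast; ring

-- ---- the binary-search loop returns the optimum ----

theorem solLoop_eq (target : List Int) (key e0 a : Int)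
    (ha0 : 0 ≤ a)
    (hfeas : a = 0 ∨ key ≤ getHeight target a)
    (hopt : ∀ h : Int, a < h → h ≤ e0 → getHeight target h < key) :
    ∀ n : Nat, ∀ s e : Int, (e - s).toNat ≤ n → 0 ≤ s → s ≤ a → a ≤ e → e ≤ e0 →
      solLoop target key s e = a := by
  intro n
  induction n with
  | zero =>
    intro s e hle hs hsa hae hee
    have hse : s = e := by omega
    rw [solLoop]
    simp [show ¬ (s < e) by omega]
    omega
  | succ n ih =>
    intro s e hle hs hsa hae hee
    rw [solLoop]
    by_cases hlt : s < e
    · simp only [hlt, dif_pos]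
      have hm1 : s < PySem.Int.floordiv (s + e) 2 + 1 := by
        have : s ≤ PySem.Int.floordiv (s + e) 2 :=
          (PySem.Int.le_floordiv_iff_mul_le (by omega)).mpr (by omega)
        omega
      have hm2 : PySem.Int.floordiv (s + e) 2 + 1 ≤ e := by
        have : PySem.Int.floordiv (s + e) 2 < e :=
          (PySem.Int.floordiv_lt_iff_lt_mul (by omega)).mpr (by omega)
        omega
      set m := PySem.Int.floordiv (s + e) 2 + 1 with hm
      by_cases hgt : getHeight target m < key
      · simp only [hgt, if_pos]
        apply ih <;> try omega
        -- a ≤ m - 1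
        by_contra hcon
        push_neg at hcon
        have ham : m ≤ a := by omega
        rcases hfeas with rfl | hk
        · omega
        · have := getHeight_mono target ham
          omega
      · simp only [hgt, if_neg, not_false_iff]
        apply ih <;> try omega
        -- m ≤ a
        by_contra hcon
        push_neg at hcon
        have := hopt m (by omega) (by omega)
        omega
    · simp [hlt]
      omega

-- head of the descending sort is the Python max
theorem head_sorted_eq_max (target : List Int) (t0 : Int) (rest : List Int)
    (hd : PySem.List.sorted target (fun x => x) true = t0 :: rest)
    (mx : Int) (hmx : PySem.List.max? target (fun x => x) = some mx) :
    t0 = mx := by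
  have hperm : (PySem.List.sorted target (fun x => x) true).Perm target := PySem.List.sorted_perm _ _ _
  have hmem : t0 ∈ target := hperm.mem_iff.mp (by rw [hd]; simp)
  have h1 : t0 ≤ mx := PySem.List.max?_isMax hmx t0 hmem
  have hmem2 : mx ∈ target := PySem.List.max?_mem hmx
  have h2 : mx ≤ t0 := PySem.List.key_head_sorted_rev_ge target (fun x => x) hd mx hmem2
  omega

-- ===== VERDICT (by name: the statement is the Claim_ definition above) =====
theorem solution_spec : Claim_equal_solution := by
  intro target key _ hpre
  unfold Spec_solution
  -- name the sorted list and its head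
  obtain ⟨t0, rest, hd⟩ : ∃ t0 rest, PySem.List.sorted target (fun x => x) true = t0 :: rest := by
    rcases hsort : PySem.List.sorted target (fun x => x) true with _ | ⟨t0, rest⟩
    · exact absurd ((PySem.List.sorted_eq_nil_iff target (fun x => x) true).mp hsort) hpre
    · exact ⟨t0, rest, rfl⟩
  obtain ⟨mx, hmx⟩ : ∃ mx, PySem.List.max? target (fun x => x) = some mx := by
    rcases h : PySem.List.max? target (fun x => x) with _ | mx
    · exact absurd ((PySem.List.max?_eq_none_iff target (fun x => x)).mp h) hpre
    · exact ⟨mx, rfl⟩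
  have ht0mx : t0 = mx := head_sorted_eq_max target t0 rest hd mx hmx
  set d := PySem.List.sorted target (fun x => x) true with hdd
  have hperm : d.Perm target := PySem.List.sorted_perm _ _ _
  have hpw : d.Pairwise (fun a b => b ≤ a) := by
    have := PySem.List.sorted_pairwise_rev target (fun x => x) (κ := Int)
    exact this
  -- B's value
  set B := bestNum key rest 1 t0 (PySem.Int.floordiv (t0 - key) 1) with hB
  -- fdiv by 1 is identity
  have hfdiv1 : ∀ x : Int, PySem.Int.floordiv x 1 = x := by
    intro x
    rw [PySem.Int.floordiv_eq_ediv_of_pos (by omega)]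
    exact Int.ediv_one x
  have halt : solution_alt target key = max 0 (min t0 B) := by
    have hstep0 : altStep key (0, 0, none) t0
        = (1, t0, some (PySem.Int.floordiv (t0 - key) 1)) := by
      simp [altStep]
    simp only [solution_alt, ← hdd, hd, List.foldl_cons, hstep0, foldl_altStep_best]
    simp
    rw [hB, hfdiv1 (t0 - key)]
  -- candidate bounds (U): every prefix candidate is ≤ B
  have hU : ∀ i : Nat, 1 ≤ i → i ≤ d.length →
      PySem.Int.floordiv ((d.take i).sum - key) (i : Int) ≤ B := by
    intro i h1 h2
    match i, h1 with
    | 1, _ =>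
      have : PySem.Int.floordiv (t0 - key) 1 ≤ B := le_bestNum key rest 1 t0 _
      simpa [hd] using this
    | (j + 2), _ =>
      have hj : j < rest.length := by
        rw [hd] at h2; simp at h2; omega
      have hcand := cand_le_bestNum key rest 1 t0 (PySem.Int.floordiv (t0 - key) 1) j hj
      rw [← hB] at hcand
      have harg : (d.take (j + 2)).sum = t0 + (rest.take (j + 1)).sum := by
        rw [hd, List.take_succ_cons, List.sum_cons]
      have hdivisor : ((j + 2 : Nat) : Int) = 1 + ((j + 1 : Nat) : Int) := by push_cast; ring
      rw [harg, hdivisor]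
      exact hcand
  -- attainment: B is some prefix candidate
  have hA : ∃ i : Nat, 1 ≤ i ∧ i ≤ d.length ∧
      B = PySem.Int.floordiv ((d.take i).sum - key) (i : Int) := by
    rcases bestNum_attained key rest 1 t0 (PySem.Int.floordiv (t0 - key) 1) with heq | ⟨j, hj, heq⟩
    · refine ⟨1, le_refl _, by rw [hd]; simp, ?_⟩
      rw [← hB] at heq
      rw [heq, hd]
      simp
    · refine ⟨j + 2, by omega, by rw [hd]; simp only [List.length_cons]; omega, ?_⟩
      rw [← hB] at heq
      have harg : (d.take (j + 2)).sum = t0 + (rest.take (j + 1)).sum := by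
        rw [hd, List.take_succ_cons, List.sum_cons]
      have hdivisor : ((j + 2 : Nat) : Int) = 1 + ((j + 1 : Nat) : Int) := by push_cast; ring
      rw [harg, hdivisor]
      exact heq
  have hsol : solution target key = solLoop target key 0 mx := by
    unfold solution; rw [hmx]
  rw [hsol, halt]
  have hmin1 := min_le_left t0 B
  have hmin2 := min_le_right t0 B
  -- degenerate case: max(target) < 0
  by_cases hmxneg : mx < 0
  · rw [solLoop]
    simp [show ¬ ((0:Int) < mx) by omega]
    omega
  · -- main case: 0 ≤ mx
    push_neg at hmxneg
    have hfeas : max 0 (min t0 B) = 0 ∨ key ≤ getHeight target (max 0 (min t0 B)) := by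
      by_cases haz : max 0 (min t0 B) = 0
      · left; exact haz
      · right
        have hapos : 0 < max 0 (min t0 B) := by omega
        have haeq : max 0 (min t0 B) = min t0 B := by omega
        obtain ⟨i, hi1, hi2, hieq⟩ := hA
        have hipos : (0:Int) < (i:Int) := by exact_mod_cast hi1
        have hbr : B * (i:Int) ≤ (d.take i).sum - key := by
          rw [hieq]
          exact (PySem.Int.le_floordiv_iff_mul_le hipos).mp (by rw [← hieq])
        have hpre2 : ∀ h : Int, (d.take i).sum - (i:Int) * h ≤ getHeight target h := by
          intro h
          calc (d.take i).sum - (i:Int) * h ≤ getHeight d h := take_sub_le_getHeight d i hi2 h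
            _ = getHeight target h := getHeight_perm hperm h
        rw [haeq]
        by_cases hBt : B ≤ t0
        · have haB : min t0 B = B := by omega
          have := hpre2 B
          rw [haB]
          nlinarith
        · have hat : min t0 B = t0 := by omega
          have := hpre2 t0
          have ht0B : t0 + 1 ≤ B := by omega
          rw [hat]
          nlinarith
    have hopt : ∀ h : Int, max 0 (min t0 B) < h → h ≤ mx → getHeight target h < key := by
      intro h hah hhmx
      by_contra hcon
      push_neg at hcon
      set P := d.takeWhile (fun t => decide (h < t)) with hP
      have hreg : getHeight d h = P.sum - P.length * h := getHeight_sorted_eq d h hpw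
      have hdh : getHeight d h = getHeight target h := getHeight_perm hperm h
      have hPpre : d.take P.length = P := by
        obtain ⟨u, hu⟩ := List.takeWhile_prefix (l := d) (p := fun t => decide (h < t))
        rw [← hP] at hu
        rw [← hu, List.take_left]
      have hPlen : P.length ≤ d.length := by
        rw [← hPpre]; simp [List.length_take]
      by_cases hc0 : P.length = 0
      · -- no tree above h: harvest is 0, so key ≤ 0 and the i=1 candidate pushes B ≥ t0
        have hPnil : P = [] := List.length_eq_zero_iff.mp hc0
        have hz : getHeight target h = 0 := by rw [← hdh, hreg, hPnil]; simp
        have hkey : key ≤ 0 := by omega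
        have hc1 : PySem.Int.floordiv ((d.take 1).sum - key) 1 ≤ B := hU 1 (le_refl _) (by rw [hd]; simp)
        rw [hfdiv1] at hc1
        have hsum1 : (d.take 1).sum = t0 := by rw [hd]; simp
        rw [hsum1] at hc1
        omega
      · -- c ≥ 1 trees above h: h is below the c-th candidate, hence ≤ B
        have hcpos : (0:Int) < (P.length : Int) := by
          have : 0 < P.length := Nat.pos_of_ne_zero hc0
          exact_mod_cast this
        have hhc : h ≤ PySem.Int.floordiv (P.sum - key) (P.length : Int) :=
          (PySem.Int.le_floordiv_iff_mul_le hcpos).mpr (by nlinarith)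
        have hUc := hU P.length (Nat.pos_of_ne_zero hc0) hPlen
        rw [hPpre] at hUc
        have hhB : h ≤ B := le_trans hhc hUc
        omega
    exact solLoop_eq target key mx (max 0 (min t0 B)) (le_max_left _ _) hfeas hopt
      mx.toNat 0 mx (by omega) (by omega) (le_max_left _ _) (by omega) (le_refl mx)
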